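-- pv_equiv track=rewrite | github.com/TelmaZzzz/NER_SC | src/metrics.py | get_tuple
-- ===== SOURCE A (Python) =====
-- def get_tuple(list):
--     tuples = []
--     l, r = 0, 0
--     for i in range(1, len(list)):
--         if list[i] == list[l] + 1 and list[l] % 2 == 1:
--             r = i
--         else:
--             if list[l] % 2 == 1:
--                 tuples.append((l, r, list[l]))
--             l = i
--             r = i
--     if list[l] % 2 == 1:
--         tuples.append((l, r, list[l]))
--     return tuples
-- ===== SOURCE B (Python) =====
-- def get_tuple(list):
--     # Greedy run consumption: at each odd value, measure the run of (value+1)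
--     # successors and jump past it; even values are skipped one by one.
--     tuples = []
--     n = len(list)
--     j = 0
--     while j < n:
--         v = list[j]
--         if v % 2 == 1:
--             m = 0
--             while j + 1 + m < n and list[j + 1 + m] == v + 1:
--                 m += 1
--             tuples.append((j, j + m, v))
--             j += m + 1
--         else:
--             j += 1
--     return tuples
-- ===== Notes on version B (the rewrite author's own statement) =====
-- stated objective: alternative
-- what changed: A scans once with shared (tuples, l, r) state updated by a break test; B is a greedy run-consuming walk: a cursor that, at each odd value, counts the run of (value+1) successors, emits the tuple immediately and jumps past the whole run, skipping even values one index at a time.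
import Mathlib
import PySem

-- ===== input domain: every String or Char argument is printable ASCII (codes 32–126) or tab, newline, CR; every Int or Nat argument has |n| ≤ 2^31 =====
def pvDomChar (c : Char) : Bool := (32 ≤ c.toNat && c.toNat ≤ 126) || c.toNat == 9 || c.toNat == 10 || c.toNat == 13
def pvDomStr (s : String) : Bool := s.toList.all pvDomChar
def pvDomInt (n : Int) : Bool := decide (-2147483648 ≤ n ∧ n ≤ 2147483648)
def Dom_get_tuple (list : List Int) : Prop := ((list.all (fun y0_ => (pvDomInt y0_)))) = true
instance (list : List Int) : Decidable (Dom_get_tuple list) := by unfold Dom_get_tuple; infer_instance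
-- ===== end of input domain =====

-- B replaces A's single boundary-scanning loop with shared (tuples, l, r) state by a
-- greedy run-consuming walk: at each odd value it measures the run of (value+1)
-- successors and jumps past it (objective: alternative, same O(n) cost).

-- ===== PORT A =====
-- list[i] for the indices A's loop produces; exact for in-range indices (Pre_ excludes
-- the empty list, the only input on which Python's indexing here raises).
def pyAt (xs : List Int) (i : Int) : Int := (PySem.List.pyGet? xs i).getD 0

-- the body of A's for-loop over i, state (tuples, l, r)
def stepA (list : List Int) (st : List (Int × Int × Int) × Int × Int) (i : Int) :
    List (Int × Int × Int) × Int × Int :=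
  if pyAt list i = pyAt list st.2.1 + 1 ∧ pyAt list st.2.1 % 2 = 1 then
    (st.1, st.2.1, i)
  else
    ((if pyAt list st.2.1 % 2 = 1 then st.1 ++ [(st.2.1, st.2.2, pyAt list st.2.1)] else st.1),
     i, i)

def get_tuple (list : List Int) : List (Int × Int × Int) :=
  let st := (PySem.List.pyRange 1 (list.length : Int) 1).foldl (stepA list) ([], 0, 0)
  if pyAt list st.2.1 % 2 = 1 then st.1 ++ [(st.2.1, st.2.2, pyAt list st.2.1)] else st.1

-- ===== PORT B =====
-- B's inner while loop: number of consecutive elements equal to target starting at index p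
def runLen (list : List Int) (target : Int) (p : Nat) : Nat :=
  if p < list.length ∧ list.getD p 0 = target then runLen list target (p + 1) + 1 else 0
termination_by list.length - p
decreasing_by omega

-- B's outer while loop over the cursor j
def goB (list : List Int) (j : Nat) : List (Int × Int × Int) :=
  if j < list.length then
    let v := list.getD j 0
    if v % 2 = 1 then
      let m := runLen list (v + 1) (j + 1)
      ((j : Int), (j : Int) + (m : Int), v) :: goB list (j + m + 1)
    else goB list (j + 1)
  else []
termination_by list.length - j
decreasing_by all_goals omega

def get_tuple_alt (list : List Int) : List (Int × Int × Int) := goB list 0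

-- ===== PRECONDITION & SPEC =====
-- Pre_ excludes only the empty list, on which Python A raises IndexError (list[l]).
def Pre_get_tuple (list : List Int) : Prop := list ≠ []
instance (list : List Int) : Decidable (Pre_get_tuple list) := by unfold Pre_get_tuple; infer_instance
def pvWitness_get_tuple : List Int := [1, 2, 3]

def Spec_get_tuple (list : List Int) (out : List (Int × Int × Int)) : Prop := out = get_tuple_alt list
instance (list : List Int) (out : List (Int × Int × Int)) : Decidable (Spec_get_tuple list out) := by unfold Spec_get_tuple; infer_instance

-- ===== CLAIM (what is proved, stated in full; the proofs are below) =====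
def Claim_equal_get_tuple : Prop := ∀ (list : List Int), Dom_get_tuple list → Pre_get_tuple list → Spec_get_tuple list (get_tuple list)

-- ===== LEMMAS AND PROOFS =====

-- runLen's elements all equal the target …
lemma runLen_elems (list : List Int) (t : Int) (p : Nat) :
    ∀ k < runLen list t p, p + k < list.length ∧ list.getD (p + k) 0 = t := by
  generalize hn : list.length - p = n
  induction n generalizing p with
  | zero =>
      rw [runLen]
      rw [if_neg (by omega)]
      intro k hk
      exact absurd hk (by omega)
  | succ n ih =>
      rw [runLen]
      split
      · rename_i h
        intro k hk
        cases k with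
        | zero => simpa using h
        | succ k =>
            have h2 := ih (p + 1) (by omega) k (by omega)
            refine ⟨by omega, ?_⟩
            have e : p + (k + 1) = (p + 1) + k := by omega
            rw [e]
            exact h2.2
      · intro k hk
        exact absurd hk (by omega)

-- … and it is maximal.
lemma runLen_max (list : List Int) (t : Int) (p : Nat) :
    ¬ (p + runLen list t p < list.length ∧ list.getD (p + runLen list t p) 0 = t) := by
  generalize hn : list.length - p = n
  induction n generalizing p with
  | zero =>
      rw [runLen, if_neg (by omega)]
      omega
  | succ n ih =>
      rw [runLen]
      split
      · have h2 := ih (p + 1) (by omega)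
        intro hc
        apply h2
        constructor
        · omega
        · have e : p + 1 + runLen list t (p + 1) = p + (runLen list t (p + 1) + 1) := by omega
          rw [e]
          exact hc.2
      · rename_i h
        simpa using h

-- pyAt on an in-range natural index is getD
lemma pyAt_natCast (list : List Int) (j : Nat) (_h : j < list.length) :
    pyAt list (j : Int) = list.getD j 0 := by
  simp [pyAt, List.getD_eq_getElem?_getD]

-- extension phase: folding stepA over k extension indices only moves r
lemma foldA_ext (list : List Int) (l : Nat) (acc : List (Int × Int × Int))
    (hodd : list.getD l 0 % 2 = 1) (hl : l < list.length) (k : Nat)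
    (hk : ∀ i < k, l + 1 + i < list.length ∧ list.getD (l + 1 + i) 0 = list.getD l 0 + 1) :
    (PySem.List.pyRange ((l : Int) + 1) ((l : Int) + 1 + (k : Int)) 1).foldl (stepA list)
      (acc, (l : Int), (l : Int))
    = (acc, (l : Int), (l : Int) + (k : Int)) := by
  induction k with
  | zero =>
      rw [PySem.List.pyRange_one_eq_nil (by omega)]
      simp
  | succ k ih =>
      have hk' : ∀ i < k, l + 1 + i < list.length ∧ list.getD (l + 1 + i) 0 = list.getD l 0 + 1 :=
        fun i hi => hk i (by omega)
      have hup : ((l : Int) + 1 + ((k : Nat) + 1 : Nat)) = ((l : Int) + 1 + (k : Int)) + 1 := by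
        push_cast; ring
      rw [hup, PySem.List.pyRange_one_succ_right (by omega), List.foldl_append, ih hk']
      have hkk := hk k (by omega)
      have hcast : (l : Int) + 1 + (k : Int) = ((l + 1 + k : Nat) : Int) := by push_cast; ring
      have hAi : pyAt list ((l : Int) + 1 + (k : Int)) = list.getD l 0 + 1 := by
        rw [hcast, pyAt_natCast list _ hkk.1]
        exact hkk.2
      have hAl : pyAt list (l : Int) = list.getD l 0 := pyAt_natCast list l hl
      simp only [List.foldl_cons, List.foldl_nil, stepA, hAi, hAl]
      rw [if_pos ⟨trivial, hodd⟩]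
      refine congrArg (Prod.mk acc) (congrArg (Prod.mk (l : Int)) ?_)
      push_cast
      ring

-- the closing emit applied to a loop state
def finA (list : List Int) (st : List (Int × Int × Int) × Int × Int) : List (Int × Int × Int) :=
  if pyAt list st.2.1 % 2 = 1 then st.1 ++ [(st.2.1, st.2.2, pyAt list st.2.1)] else st.1

-- main invariant: A's tail loop from a freshly started group at l emits acc ++ goB l
lemma foldA_goB (list : List Int) : ∀ (n l : Nat), list.length - l = n → l < list.length →
    ∀ acc : List (Int × Int × Int),
    finA list ((PySem.List.pyRange ((l : Int) + 1) (list.length : Int) 1).foldl (stepA list)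
        (acc, (l : Int), (l : Int)))
    = acc ++ goB list l := by
  intro n
  induction n using Nat.strong_induction_on with
  | _ n ih =>
  intro l hn hl acc
  rw [goB, if_pos hl]
  have hAl : pyAt list (l : Int) = list.getD l 0 := pyAt_natCast list l hl
  by_cases hodd : list.getD l 0 % 2 = 1
  · rw [if_pos hodd]
    have helems := runLen_elems list (list.getD l 0 + 1) (l + 1)
    have hmax := runLen_max list (list.getD l 0 + 1) (l + 1)
    set m := runLen list (list.getD l 0 + 1) (l + 1) with hm
    have hub : l + m < list.length := by
      rcases Nat.eq_zero_or_pos m with h0 | hpos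
      · omega
      · have := helems (m - 1) (by omega)
        omega
    have hext := foldA_ext list l acc hodd hl m (fun i hi => helems i hi)
    rw [PySem.List.pyRange_one_append ((l : Int) + 1) ((l : Int) + 1 + (m : Int))
          (list.length : Int) (by omega) (by omega),
        List.foldl_append, hext]
    have hcast : (l : Int) + 1 + (m : Int) = ((l + 1 + m : Nat) : Int) := by push_cast; ring
    by_cases hend : l + 1 + m = list.length
    · rw [show PySem.List.pyRange ((l : Int) + 1 + (m : Int)) (list.length : Int) 1 = [] from
          PySem.List.pyRange_one_eq_nil (by omega)]
      simp only [List.foldl_nil, finA, hAl]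
      rw [if_pos hodd, goB, if_neg (by omega)]
    · rw [PySem.List.pyRange_one_cons (show (l : Int) + 1 + (m : Int) < (list.length : Int) by omega)]
      simp only [List.foldl_cons]
      have hAi : pyAt list ((l : Int) + 1 + (m : Int)) = list.getD (l + 1 + m) 0 := by
        rw [hcast]; exact pyAt_natCast list _ (by omega)
      have hne : list.getD (l + 1 + m) 0 ≠ list.getD l 0 + 1 := fun h => hmax ⟨by omega, h⟩
      have hstep : stepA list (acc, (l : Int), (l : Int) + (m : Int)) ((l : Int) + 1 + (m : Int))
          = (acc ++ [((l : Int), (l : Int) + (m : Int), list.getD l 0)],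
             (l : Int) + 1 + (m : Int), (l : Int) + 1 + (m : Int)) := by
        simp only [stepA, hAi, hAl]
        rw [if_neg (fun hc => hne hc.1), if_pos hodd]
      rw [hstep]
      have hrec := ih (list.length - (l + m + 1)) (by omega) (l + m + 1) rfl (by omega)
        (acc ++ [((l : Int), (l : Int) + (m : Int), list.getD l 0)])
      have hcast2 : ((l + m + 1 : Nat) : Int) = (l : Int) + 1 + (m : Int) := by push_cast; ring
      rw [hcast2] at hrec
      rw [hrec]
      simp
  · rw [if_neg hodd]
    by_cases hend : l + 1 = list.length
    · rw [show PySem.List.pyRange ((l : Int) + 1) (list.length : Int) 1 = [] from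
          PySem.List.pyRange_one_eq_nil (by omega)]
      simp only [List.foldl_nil, finA, hAl]
      rw [if_neg hodd, goB, if_neg (by omega)]
      simp
    · rw [PySem.List.pyRange_one_cons (show (l : Int) + 1 < (list.length : Int) by omega)]
      simp only [List.foldl_cons]
      have hstep : stepA list (acc, (l : Int), (l : Int)) ((l : Int) + 1)
          = (acc, (l : Int) + 1, (l : Int) + 1) := by
        simp only [stepA, hAl]
        rw [if_neg (fun hc => hodd hc.2), if_neg hodd]
      rw [hstep]
      have hrec := ih (list.length - (l + 1)) (by omega) (l + 1) rfl (by omega) acc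
      have hcast2 : ((l + 1 : Nat) : Int) = (l : Int) + 1 := by push_cast; ring
      rw [hcast2] at hrec
      exact hrec

-- ===== VERDICT (by name: the statement is the Claim_ definition above) =====
theorem get_tuple_spec : Claim_equal_get_tuple := by
  intro list _ hpre
  show get_tuple list = get_tuple_alt list
  have hl : 0 < list.length := List.length_pos_iff.mpr hpre
  have := foldA_goB list list.length 0 (by omega) hl []
  simpa [get_tuple, get_tuple_alt, finA] using this
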